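-- pv_equiv track=rewrite | github.com/Sharonprincy234/FP- | app.py | _format_code_response
-- ===== SOURCE A (Python) =====
-- def _format_code_response(response):
--     lines = response.split('\n')
--     in_code_block = False
--     code_block_lines = []
--     formatted_lines = []
--
--     for line in lines:
--         if line.strip().startswith('```'):
--             if in_code_block and code_block_lines:
--                 if len(code_block_lines) > 5:
--                     numbered_lines = []
--                     for i, code_line in enumerate(code_block_lines, 1):
--                         numbered_lines.append(f"{i:2d} | {code_line}")
--                     formatted_lines.extend(numbered_lines)
--                 else:
--                     formatted_lines.extend(code_block_lines)
--                 code_block_lines = []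
--
--             in_code_block = not in_code_block
--             formatted_lines.append(line)
--         elif in_code_block:
--             code_block_lines.append(line)
--         else:
--             formatted_lines.append(line)
--
--     return '\n'.join(formatted_lines)
-- ===== SOURCE B (Python) =====
-- def _format_code_response(response):
--     lines = response.split('\n')
--     out = []
--     i = 0
--     n = len(lines)
--     while i < n:
--         line = lines[i]
--         if not line.strip().startswith('```'):
--             out.append(line)
--             i += 1
--             continue
--         # opening fence
--         out.append(line)
--         i += 1
--         block = []
--         while i < n and not lines[i].strip().startswith('```'):
--             block.append(lines[i])
--             i += 1
--         if i == n:
--             break  # unterminated block: its lines are dropped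
--         if len(block) > 5:
--             out.extend(f"{k:2d} | {cl}" for k, cl in enumerate(block, 1))
--         else:
--             out.extend(block)
--         out.append(lines[i])  # closing fence
--         i += 1
--     return '\n'.join(out)
-- ===== Notes on version B (the rewrite author's own statement) =====
-- stated objective: alternative
-- what changed: Replaces A's single pass with a boolean in_code_block state machine and pending-block accumulator by an index-driven outer while loop with a nested inner while loop that collects each fenced block up to its closing fence (dropping an unterminated trailing block).
import Mathlib
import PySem

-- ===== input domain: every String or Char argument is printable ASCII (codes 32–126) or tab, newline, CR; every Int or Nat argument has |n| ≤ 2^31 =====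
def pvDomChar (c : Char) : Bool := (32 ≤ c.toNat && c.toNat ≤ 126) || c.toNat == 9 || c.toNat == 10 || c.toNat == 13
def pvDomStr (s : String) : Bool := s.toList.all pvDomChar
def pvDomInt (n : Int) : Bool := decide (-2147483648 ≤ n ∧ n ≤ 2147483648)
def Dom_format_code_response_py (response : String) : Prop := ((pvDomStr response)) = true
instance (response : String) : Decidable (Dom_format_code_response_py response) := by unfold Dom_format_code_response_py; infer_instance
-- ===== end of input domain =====

-- B replaces A's boolean state machine (in_code_block flag + pending-block accumulator threaded
-- through one fold) by an index-driven outer loop with an inner block-collecting loop (mutual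
-- recursion in the port); objective: alternative decomposition, same O(n) cost.

-- ===== PORT A =====
-- shared with port B: fence test `line.strip().startswith('```')`
def pvIsFence (line : String) : Bool :=
  PySem.Str.startswith (PySem.Str.strip line) "```"

-- shared with port B: f"{i:2d} | {code_line}" (i ≥ 1 in every use)
def pvFmt (i : Int) (codeLine : String) : String :=
  (if i < 10 then " " ++ PySem.Int.toStr i else PySem.Int.toStr i) ++ " | " ++ codeLine

-- one step of A's for-loop; state = (in_code_block, code_block_lines, formatted_lines)
def pvStepA (st : Bool × List String × List String) (line : String) :
    Bool × List String × List String :=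
  if pvIsFence line then
    let fl :=
      if st.1 ∧ st.2.1 ≠ [] then
        if st.2.1.length > 5 then
          st.2.2 ++ (PySem.List.enumerate st.2.1 1).foldl
            (fun acc p => acc ++ [pvFmt p.1 p.2]) []
        else st.2.2 ++ st.2.1
      else st.2.2
    (!st.1, ([] : List String), fl ++ [line])
  else if st.1 then (st.1, st.2.1 ++ [line], st.2.2)
  else (st.1, st.2.1, st.2.2 ++ [line])

def format_code_response_py (response : String) : String :=
  PySem.Str.join "\n" (((PySem.Str.split? response "\n").getD []).foldl pvStepA (false, [], [])).2.2

-- ===== PORT B =====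
-- flush a completed block: number when longer than 5 lines
def pvFlushB (block : List String) : List String :=
  if block.length > 5 then (PySem.List.enumerate block 1).map (fun p => pvFmt p.1 p.2)
  else block

mutual
  -- outer loop: lines outside code blocks
  def pvGoB : List String → List String
    | [] => []
    | l :: rest => if pvIsFence l then l :: pvScanB rest [] else l :: pvGoB rest
  termination_by ls => ls.length
  -- inner loop: collect block lines until a closing fence (EOF ⇒ block dropped)
  def pvScanB : List String → List String → List String
    | [], _ => []
    | l :: rest, block =>
      if pvIsFence l then pvFlushB block ++ l :: pvGoB rest
      else pvScanB rest (block ++ [l])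
  termination_by ls _ => ls.length
end

def format_code_response_py_alt (response : String) : String :=
  PySem.Str.join "\n" (pvGoB ((PySem.Str.split? response "\n").getD []))

-- ===== PRECONDITION & SPEC =====
def Spec_format_code_response_py (response : String) (out : String) : Prop := out = format_code_response_py_alt response
instance (response : String) (out : String) : Decidable (Spec_format_code_response_py response out) := by unfold Spec_format_code_response_py; infer_instance

-- ===== CLAIM (what is proved, stated in full; the proofs are below) =====
def Claim_equal_format_code_response_py : Prop := ∀ (response : String), Dom_format_code_response_py response → Spec_format_code_response_py response (format_code_response_py response)

-- ===== LEMMAS AND PROOFS =====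

-- A's append-in-a-loop builds exactly a map
theorem pv_foldl_append_eq_map {α β : Type} (f : α → β) :
    ∀ (l : List α) (acc : List β),
      l.foldl (fun acc p => acc ++ [f p]) acc = acc ++ l.map f := by
  intro l
  induction l with
  | nil => simp
  | cons x xs ih => intro acc; simp [List.foldl, ih]

-- A's flush (for a nonempty pending block) equals B's pvFlushB
theorem pv_flush_eq (block : List String) (out : List String) :
    (if block.length > 5 then
        out ++ (PySem.List.enumerate block 1).foldl (fun acc p => acc ++ [pvFmt p.1 p.2]) []
      else out ++ block) = out ++ pvFlushB block := by
  unfold pvFlushB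
  split_ifs with h
  · rw [pv_foldl_append_eq_map]; simp
  · rfl

-- main invariant: A's fold from either machine state equals the corresponding B loop
theorem pv_main : ∀ (n : Nat) (ls : List String), ls.length = n →
    (∀ out, (ls.foldl pvStepA (false, [], out)).2.2 = out ++ pvGoB ls) ∧
    (∀ block out, (ls.foldl pvStepA (true, block, out)).2.2 = out ++ pvScanB ls block) := by
  intro n
  induction n using Nat.strong_induction_on with
  | _ n ih =>
    intro ls hlen
    cases ls with
    | nil => simp [pvGoB, pvScanB]
    | cons l rest =>
      have hrest : rest.length < n := by simp [← hlen]
      constructor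
      · intro out
        by_cases hf : pvIsFence l = true
        · simp [List.foldl, pvStepA, hf, pvGoB]
          rw [(ih rest.length hrest rest rfl).2]
          simp
        · simp [List.foldl, pvStepA, hf, pvGoB]
          rw [(ih rest.length hrest rest rfl).1]
          simp
      · intro block out
        by_cases hf : pvIsFence l = true
        · simp only [List.foldl, pvStepA, hf, pvScanB]
          by_cases hb : block = []
          · subst hb
            simp only [List.length_nil, ne_eq, not_true_eq_false, and_false,
              Bool.not_true, if_false, reduceIte]
            rw [(ih rest.length hrest rest rfl).1]
            simp [pvFlushB]
          · simp only [ne_eq, hb, not_false_eq_true, and_true, Bool.not_true,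
              if_true]
            rw [pv_flush_eq block out]
            rw [(ih rest.length hrest rest rfl).1]
            simp
        · simp [List.foldl, pvStepA, hf, pvScanB]
          rw [(ih rest.length hrest rest rfl).2]

-- ===== VERDICT (by name: the statement is the Claim_ definition above) =====
theorem format_code_response_py_spec : Claim_equal_format_code_response_py := by
  intro response _
  unfold Spec_format_code_response_py format_code_response_py format_code_response_py_alt
  rw [(pv_main ((PySem.Str.split? response "\n").getD []).length ((PySem.Str.split? response "\n").getD []) rfl).1 []]
  simp
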